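-- pv_equiv track=rewrite | github.com/ArcaneChat/chatmail | chatmaild/src/chatmaild/doveauth.py | split_and_unescape
-- ===== SOURCE A (Python) =====
-- def split_and_unescape(s):
--     """Split strings using double quote as a separator and backslash as escape character
--     into parts."""
--
--     out = ""
--     i = 0
--     while i < len(s):
--         c = s[i]
--         if c == "\\":
--             # Skip escape character.
--             i += 1
--
--             # This will raise IndexError if there is no character
--             # after escape character. This is expected
--             # as this is an invalid input.
--             out += s[i]
--         elif c == '"':
--             # Separator
--             yield out
--             out = ""
--         else:
--             out += c
--         i += 1
--     yield out
-- ===== SOURCE B (Python) =====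
-- def split_and_unescape(s):
--     """Split strings using double quote as a separator and backslash as escape character
--     into parts."""
--     out = ""
--     i = 0
--     n = len(s)
--     while i < n:
--         j = i
--         while j < n and s[j] != "\\" and s[j] != '"':
--             j += 1
--         out += s[i:j]
--         if j == n:
--             break
--         if s[j] == "\\":
--             # IndexError on a trailing lone backslash, as in the original.
--             out += s[j + 1]
--             i = j + 2
--         else:
--             yield out
--             out = ""
--             i = j + 1
--     yield out
-- ===== Notes on version B (the rewrite author's own statement) =====
-- stated objective: faster
-- what changed: B replaces A's per-character state machine (one branch decision and one one-character string concatenation per character) with a segment scan: an inner cursor skips each maximal run of ordinary characters and appends it as a single slice, so only backslashes and quotes are handled individually and the number of string concatenations drops from one per character to one per special character.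
import Mathlib
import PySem

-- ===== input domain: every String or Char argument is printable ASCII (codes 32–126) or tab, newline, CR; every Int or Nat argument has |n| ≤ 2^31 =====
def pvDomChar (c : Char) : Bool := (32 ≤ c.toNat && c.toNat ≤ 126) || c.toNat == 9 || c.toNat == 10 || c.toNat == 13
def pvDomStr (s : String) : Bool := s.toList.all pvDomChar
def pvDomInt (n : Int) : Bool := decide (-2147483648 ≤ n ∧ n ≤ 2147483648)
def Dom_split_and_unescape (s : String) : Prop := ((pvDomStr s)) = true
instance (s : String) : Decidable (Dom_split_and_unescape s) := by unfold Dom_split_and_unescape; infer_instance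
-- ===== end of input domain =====

-- B replaces A's per-character scan with a segment scan (runs of ordinary characters are
-- appended in one slice); A and B are proved to return the same parts on every input on
-- which the Python A returns (Pre_ excludes strings ending in an odd run of backslashes,
-- on which both Pythons raise IndexError).


-- ===== PORT A =====
-- A: per-character loop; out accumulates characters, '"' yields out, '\' consumes the next
-- character (Python raises IndexError when '\' is last; that input is outside Pre_ and the
-- port's value there is irrelevant).
def goA : List Char → List Char → List String
  | [], out => [String.ofList out]
  | c :: rest, out =>
    if c = '\\' then
      match rest with
      | [] => [String.ofList out]          -- Python: IndexError (excluded by Pre_)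
      | d :: rest' => goA rest' (out ++ [d])
    else if c = '"' then String.ofList out :: goA rest []
    else goA rest (out ++ [c])

def split_and_unescape (s : String) : List String := goA s.toList []

-- ===== PORT B =====
-- inner while loop of B: split off the maximal run of ordinary characters
def scanSeg : List Char → List Char × List Char
  | [] => ([], [])
  | c :: cs =>
    if c = '\\' ∨ c = '"' then ([], c :: cs)
    else
      let p := scanSeg cs
      (c :: p.1, p.2)

theorem scanSeg_snd_len (cs : List Char) : (scanSeg cs).2.length ≤ cs.length := by
  induction cs with
  | nil => simp [scanSeg]
  | cons c cs ih =>
    simp only [scanSeg]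
    split
    · simp
    · simpa using Nat.le_succ_of_le ih

def goB (cs : List Char) (out : List Char) : List String :=
  match h : scanSeg cs with
  | (seg, []) => [String.ofList (out ++ seg)]
  | (seg, c :: rest) =>
    if c = '\\' then
      match rest with
      | [] => [String.ofList (out ++ seg)]   -- Python: IndexError (excluded by Pre_)
      | d :: rest' => goB rest' (out ++ seg ++ [d])
    else String.ofList (out ++ seg) :: goB rest []
termination_by cs.length
decreasing_by
  · have := scanSeg_snd_len cs
    rw [h] at this
    simp at this
    omega
  · have := scanSeg_snd_len cs
    rw [h] at this
    simp at this
    omega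

def split_and_unescape_alt (s : String) : List String := goB s.toList []

-- ===== PRECONDITION & SPEC =====
-- Pre_ excludes exactly the strings ending in an odd-length run of backslashes: there the
-- Python A raises IndexError (escape character with nothing after it), and B raises too.
def Pre_split_and_unescape (s : String) : Prop :=
  (s.toList.reverse.takeWhile (· = '\\')).length % 2 = 0
instance (s : String) : Decidable (Pre_split_and_unescape s) := by
  unfold Pre_split_and_unescape; infer_instance
def pvWitness_split_and_unescape : String := "ab\\\"c\"d"

def Spec_split_and_unescape (s : String) (out : List String) : Prop := out = split_and_unescape_alt s
instance (s : String) (out : List String) : Decidable (Spec_split_and_unescape s out) := by unfold Spec_split_and_unescape; infer_instance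

-- ===== CLAIM (what is proved, stated in full; the proofs are below) =====
def Claim_equal_split_and_unescape : Prop := ∀ (s : String), Dom_split_and_unescape s → Pre_split_and_unescape s → Spec_split_and_unescape s (split_and_unescape s)

-- ===== LEMMAS AND PROOFS =====

theorem scanSeg_append (cs : List Char) : (scanSeg cs).1 ++ (scanSeg cs).2 = cs := by
  induction cs with
  | nil => simp [scanSeg]
  | cons c cs ih =>
    simp only [scanSeg]
    split
    · simp
    · simpa using ih

theorem scanSeg_fst_ordinary (cs : List Char) :
    ∀ c ∈ (scanSeg cs).1, ¬ (c = '\\' ∨ c = '"') := by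
  induction cs with
  | nil => simp [scanSeg]
  | cons c cs ih =>
    simp only [scanSeg]
    split
    · simp
    · next hne =>
      intro x hx
      rcases List.mem_cons.mp hx with rfl | hx
      · exact hne
      · exact ih x hx

-- A skips a run of ordinary characters by appending each in turn
theorem goA_ordinary (seg : List Char) (h : ∀ c ∈ seg, ¬ (c = '\\' ∨ c = '"')) :
    ∀ (rest out : List Char), goA (seg ++ rest) out = goA rest (out ++ seg) := by
  induction seg with
  | nil => simp
  | cons c seg ih =>
    intro rest out
    have hc := h c (by simp)
    have hseg : ∀ x ∈ seg, ¬ (x = '\\' ∨ x = '"') := fun x hx => h x (List.mem_cons_of_mem _ hx)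
    have hc1 : ¬ c = '\\' := fun hh => hc (Or.inl hh)
    have hc2 : ¬ c = '"' := fun hh => hc (Or.inr hh)
    rw [List.cons_append, goA.eq_def]
    simp only [if_neg hc1, if_neg hc2]
    rw [ih hseg rest (out ++ [c])]
    simp

theorem scanSeg_snd_special (cs : List Char) :
    ∀ c rest, (scanSeg cs).2 = c :: rest → c = '\\' ∨ c = '"' := by
  induction cs with
  | nil => simp [scanSeg]
  | cons c cs ih =>
    simp only [scanSeg]
    split
    · next hsp => intro x rest hx; rw [List.cons.injEq] at hx; exact hx.1 ▸ hsp
    · simpa using ih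

-- main lemma: the segment scan computes exactly what the per-character loop computes
theorem goB_eq_goA_aux : ∀ (n : Nat) (cs : List Char), cs.length ≤ n →
    ∀ out, goB cs out = goA cs out := by
  intro n
  induction n with
  | zero =>
    intro cs hlen out
    have hnil : cs = [] := List.eq_nil_of_length_eq_zero (Nat.le_zero.mp hlen)
    subst hnil
    simp [goB, scanSeg, goA]
  | succ n ih =>
    intro cs hlen out
    rw [goB.eq_def]
    split
    · next seg heq =>
      have hcs : seg ++ ([] : List Char) = cs := by
        have := scanSeg_append cs; rw [heq] at this; exact this
      have hord : ∀ c ∈ seg, ¬ (c = '\\' ∨ c = '"') := by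
        have := scanSeg_fst_ordinary cs; rw [heq] at this; exact this
      rw [← hcs, goA_ordinary seg hord]
      simp [goA]
    · next seg c rest heq =>
      have hcs : seg ++ (c :: rest) = cs := by
        have := scanSeg_append cs; rw [heq] at this; exact this
      have hord : ∀ x ∈ seg, ¬ (x = '\\' ∨ x = '"') := by
        have := scanSeg_fst_ordinary cs; rw [heq] at this; exact this
      have hlen2 : (c :: rest).length ≤ cs.length := by
        have := scanSeg_snd_len cs; rw [heq] at this; exact this
      have hsp : c = '\\' ∨ c = '"' := scanSeg_snd_special cs c rest (by rw [heq])
      conv_rhs => rw [← hcs]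
      rw [goA_ordinary seg hord]
      by_cases hc : c = '\\'
      · subst hc
        rw [if_pos rfl]
        cases rest with
        | nil => simp [goA]
        | cons d rest'' =>
          have hrec := ih rest'' (by simp at hlen2; omega) (out ++ seg ++ [d])
          have h2 : goA ('\\' :: d :: rest'') (out ++ seg)
              = goA rest'' (out ++ seg ++ [d]) := by simp [goA]
          exact hrec.trans h2.symm
      · have hq : c = '"' := hsp.resolve_left hc
        subst hq
        rw [if_neg hc]
        have hrec := ih rest (by simp at hlen2; omega) []
        have h2 : goA ('"' :: rest) (out ++ seg)
            = String.ofList (out ++ seg) :: goA rest [] := by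
          rw [goA.eq_def]
          dsimp only
          rw [if_neg hc, if_pos rfl]
        exact (congrArg _ hrec).trans h2.symm

theorem goB_eq_goA (cs out : List Char) : goB cs out = goA cs out :=
  goB_eq_goA_aux cs.length cs le_rfl out

theorem final (s : String) : split_and_unescape s = split_and_unescape_alt s := by
  simp [split_and_unescape, split_and_unescape_alt, goB_eq_goA]

-- ===== VERDICT (by name: the statement is the Claim_ definition above) =====
theorem split_and_unescape_spec : Claim_equal_split_and_unescape := by
  intro s _ _
  unfold Spec_split_and_unescape
  exact final s
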